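-- pv_equiv track=rewrite | github.com/airenas/punctuation | egs/bit-prepare2/local/change_num.py | change_word
-- ===== SOURCE A (Python) =====
-- def change_word(line):
--     is_num = False
--     for c in line:
--         if c.isdigit():
--             is_num = True
--             continue
--         if c == '.' or c == ',' or c == '/' or c == ':' or c == '-':
--             continue
--         return line
--     if is_num:
--         return '<NUM>'
--     return line
-- ===== SOURCE B (Python) =====
-- def change_word(line):
--     rest = set(line) - {'.', ',', '/', ':', '-'}
--     return '<NUM>' if ''.join(rest).isdigit() else line
-- ===== Notes on version B (the rewrite author's own statement) =====
-- stated objective: simpler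
-- what changed: Replaces the flag-carrying early-return loop with a set difference removing the allowed punctuation followed by one isdigit() classification of the remaining distinct characters.
import Mathlib
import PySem

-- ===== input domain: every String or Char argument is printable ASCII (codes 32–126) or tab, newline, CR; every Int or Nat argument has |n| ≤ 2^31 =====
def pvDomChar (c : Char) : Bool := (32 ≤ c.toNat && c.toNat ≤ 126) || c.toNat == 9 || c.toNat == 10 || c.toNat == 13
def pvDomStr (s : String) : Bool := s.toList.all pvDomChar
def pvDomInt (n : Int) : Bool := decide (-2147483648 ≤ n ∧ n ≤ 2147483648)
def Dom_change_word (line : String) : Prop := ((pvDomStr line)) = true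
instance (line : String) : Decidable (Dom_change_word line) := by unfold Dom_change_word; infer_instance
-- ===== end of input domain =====

-- B replaces A's flag-and-early-return loop by a set difference (distinct chars minus allowed punctuation) and one isdigit() classification; objective: simpler.

-- ===== PORT A =====
-- the for-loop with the is_num flag and the early 'return line'
def change_word_go (line : String) : List Char → Bool → String
  | [], isNum => if isNum then "<NUM>" else line
  | c :: cs, isNum =>
    if PySem.Chars.isdigit c then change_word_go line cs true
    else if c = '.' ∨ c = ',' ∨ c = '/' ∨ c = ':' ∨ c = '-' then change_word_go line cs isNum
    else line

def change_word (line : String) : String := change_word_go line line.toList false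

-- ===== PORT B =====
def change_word_alt (line : String) : String :=
  let rest : PySem.Set Char := PySem.Set.diff (PySem.Set.ofList line.toList) ['.', ',', '/', ':', '-']
  if PySem.Chars.strIsdigit (PySem.Chars.join [] (rest.map (fun c => [c]))) then "<NUM>" else line

-- ===== PRECONDITION & SPEC =====
def Spec_change_word (line : String) (out : String) : Prop := out = change_word_alt line
instance (line : String) (out : String) : Decidable (Spec_change_word line out) := by unfold Spec_change_word; infer_instance

-- ===== CLAIM (what is proved, stated in full; the proofs are below) =====
def Claim_equal_change_word : Prop := ∀ (line : String), Dom_change_word line → Spec_change_word line (change_word line)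

-- ===== LEMMAS AND PROOFS =====

-- the characters A's loop skips without setting the flag
def pvPunct (c : Char) : Bool := decide (c = '.' ∨ c = ',' ∨ c = '/' ∨ c = ':' ∨ c = '-')

-- A's loop computes: '<NUM>' iff every char is digit-or-punct and the flag ends true
theorem change_word_go_spec (line : String) (cs : List Char) (isNum : Bool) :
    change_word_go line cs isNum =
      if cs.all (fun c => PySem.Chars.isdigit c || pvPunct c) && (isNum || cs.any PySem.Chars.isdigit)
      then "<NUM>" else line := by
  induction cs generalizing isNum with
  | nil => simp [change_word_go]
  | cons c cs ih =>
    simp only [change_word_go, List.all_cons, List.any_cons]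
    by_cases hd : PySem.Chars.isdigit c = true
    · simp [hd, ih, pvPunct]
    · by_cases hp : c = '.' ∨ c = ',' ∨ c = '/' ∨ c = ':' ∨ c = '-'
      · simp [hd, hp, ih, pvPunct]
      · simp [hd, hp, pvPunct]

-- the five punctuation characters are not digits
theorem pvPunct_not_digit (c : Char) (h : pvPunct c = true) : PySem.Chars.isdigit c = false := by
  simp only [pvPunct, decide_eq_true_eq] at h
  rcases h with h | h | h | h | h <;> subst h <;> decide

-- B's condition equals A's loop condition (with the flag starting false)
theorem cond_eq (L : List Char) :
    PySem.Chars.strIsdigit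
        (PySem.Chars.join [] ((PySem.Set.diff (PySem.Set.ofList L) ['.', ',', '/', ':', '-']).map (fun c => [c])))
      = (L.all (fun c => PySem.Chars.isdigit c || pvPunct c) && L.any PySem.Chars.isdigit) := by
  rw [PySem.Chars.join_nil_singletons]
  have hmem : ∀ c, c ∈ PySem.Set.diff (PySem.Set.ofList L) ['.', ',', '/', ':', '-'] ↔
      c ∈ L ∧ pvPunct c = false := by
    intro c
    rw [PySem.Set.mem_diff, PySem.Set.mem_ofList]
    simp [pvPunct]
  rw [Bool.eq_iff_iff]
  simp only [PySem.Chars.strIsdigit, Bool.and_eq_true, Bool.not_eq_eq_eq_not, Bool.not_true,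
    List.isEmpty_eq_false_iff, List.all_eq_true, List.any_eq_true, Bool.or_eq_true]
  constructor
  · rintro ⟨hne, hall⟩
    obtain ⟨c, hc⟩ := List.exists_mem_of_ne_nil _ hne
    obtain ⟨hcL, _⟩ := (hmem c).mp hc
    refine ⟨fun x hx => ?_, ⟨c, hcL, hall c hc⟩⟩
    by_cases hpx : pvPunct x = true
    · exact Or.inr hpx
    · exact Or.inl (hall x ((hmem x).mpr ⟨hx, Bool.eq_false_iff.mpr hpx⟩))
  · rintro ⟨hall, ⟨c, hcL, hcd⟩⟩
    have hcp : pvPunct c = false := by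
      rcases Bool.eq_false_or_eq_true (pvPunct c) with h | h
      · rw [pvPunct_not_digit c h] at hcd; exact absurd hcd (by simp)
      · exact h
    have hcmem : c ∈ PySem.Set.diff (PySem.Set.ofList L) ['.', ',', '/', ':', '-'] :=
      (hmem c).mpr ⟨hcL, hcp⟩
    refine ⟨List.ne_nil_of_mem hcmem, fun x hx => ?_⟩
    obtain ⟨hxL, hxp⟩ := (hmem x).mp hx
    rcases hall x hxL with h | h
    · exact h
    · rw [hxp] at h; exact absurd h (by simp)

-- ===== VERDICT (by name: the statement is the Claim_ definition above) =====
theorem change_word_spec : Claim_equal_change_word := by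
  intro line _
  show change_word line = change_word_alt line
  unfold change_word
  rw [change_word_go_spec]
  simp only [change_word_alt]
  rw [cond_eq, Bool.false_or]
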